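-- pv_equiv track=rewrite | github.com/supervisely-ecosystem/group-images-for-multiview-labeling | src/main.py | get_free_tag_name
-- ===== SOURCE A (Python) =====
-- from typing import List, Dict, Tuple
--
-- def get_free_tag_name(original_string: str, names_list: List[str]):
--     if original_string in names_list:
--         counter = 1
--         new_string = f"{original_string}_{counter}"
--         while new_string in names_list:
--             counter += 1
--             new_string = f"{original_string}_{counter}"
--         return new_string
--     else:
--         return original_string
-- ===== SOURCE B (Python) =====
-- def _suffix_value(s):
--     # canonical positive decimal suffix: nonempty, all digits, no leading zero
--     if not s or s[0] == "0":
--         return None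
--     v = 0
--     for ch in s:
--         if not ("0" <= ch <= "9"):
--             return None
--         v = v * 10 + (ord(ch) - 48)
--     return v
--
-- def get_free_tag_name(original_string, names_list):
--     if original_string not in names_list:
--         return original_string
--     prefix = original_string + "_"
--     candidates = [_suffix_value(name[len(prefix):]) for name in names_list if name.startswith(prefix)]
--     ans = 1
--     for v in sorted({v for v in candidates if v is not None}):
--         if v == ans:
--             ans += 1
--         else:
--             break
--     return f"{original_string}_{ans}"
-- ===== Notes on version B (the rewrite author's own statement) =====
-- stated objective: alternative
-- what changed: A probes candidate names 'base_1','base_2',... against the list until one is missing; B never probes: it parses each listed name's suffix as a canonical positive decimal number in one pass, sorts the distinct numbers, and computes the answer as the mex (first gap) of that sorted sequence by a single linear scan.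
import Mathlib
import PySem

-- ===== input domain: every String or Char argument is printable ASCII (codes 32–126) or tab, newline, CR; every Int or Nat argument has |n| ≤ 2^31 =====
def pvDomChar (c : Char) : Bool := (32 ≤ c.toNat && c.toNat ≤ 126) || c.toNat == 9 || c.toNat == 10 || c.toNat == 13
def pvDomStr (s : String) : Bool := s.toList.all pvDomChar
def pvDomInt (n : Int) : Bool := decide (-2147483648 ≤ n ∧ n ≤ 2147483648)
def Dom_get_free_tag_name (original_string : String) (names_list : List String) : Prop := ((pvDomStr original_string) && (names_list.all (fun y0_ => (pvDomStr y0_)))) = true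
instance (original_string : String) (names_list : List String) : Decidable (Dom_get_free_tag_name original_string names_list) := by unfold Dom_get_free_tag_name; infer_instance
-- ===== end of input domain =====

-- B replaces A's probe loop ('try base_1, base_2, ... against the list') by a single pass that
-- parses each name's suffix as a canonical positive decimal, sorts the distinct parsed numbers,
-- and takes the mex (first gap) of that sorted sequence (objective: alternative algorithm).

-- ===== PORT A =====
-- A's 'while new_string in names_list' loop; fuel names_list.length + 1 is provably enough
-- (at most names_list.length + 1 counters can be probed before a free one is found).
def pvAgo (original_string : String) (names_list : List String) : Nat → Int → String
  | 0, counter => original_string ++ "_" ++ PySem.Int.toStr counter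
  | fuel + 1, counter =>
    let new_string := original_string ++ "_" ++ PySem.Int.toStr counter
    if new_string ∈ names_list then
      pvAgo original_string names_list fuel (counter + 1)
    else new_string

def get_free_tag_name (original_string : String) (names_list : List String) : String :=
  if original_string ∈ names_list then
    pvAgo original_string names_list (names_list.length + 1) 1
  else original_string

-- ===== PORT B =====
-- the 'for ch in s' loop of _suffix_value: v = v * 10 + (ord(ch) - 48), None on a non-digit
def pvSufLoop : List Char → Int → Option Int
  | [], v => some v
  | c :: rest, v =>
    if '0' ≤ c ∧ c ≤ '9' then pvSufLoop rest (v * 10 + ((c.toNat : Int) - 48))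
    else none

-- _suffix_value(s): None if s empty or s[0] == '0', else the digit loop starting from 0
def pvSufVal (cs : List Char) : Option Int :=
  match cs with
  | [] => none
  | c :: rest => if c = '0' then none else pvSufLoop (c :: rest) 0

-- 'for v in sorted({...}): if v == ans: ans += 1 else: break'
def pvMex : Int → List Int → Int
  | ans, [] => ans
  | ans, v :: rest => if v = ans then pvMex (ans + 1) rest else ans

def get_free_tag_name_alt (original_string : String) (names_list : List String) : String :=
  if original_string ∉ names_list then original_string
  else
    let pfx := original_string ++ "_"
    let candidates := (names_list.filter (fun n => PySem.Str.startswith n pfx)).map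
      (fun n => pvSufVal (PySem.Str.slice n (some (PySem.Str.len pfx)) none).toList)
    let used := PySem.List.sorted (PySem.Set.ofList (candidates.filterMap id)) (fun x => x) false
    original_string ++ "_" ++ PySem.Int.toStr (pvMex 1 used)

-- ===== PRECONDITION & SPEC =====
def Spec_get_free_tag_name (original_string : String) (names_list : List String) (out : String) : Prop := out = get_free_tag_name_alt original_string names_list
instance (original_string : String) (names_list : List String) (out : String) : Decidable (Spec_get_free_tag_name original_string names_list out) := by unfold Spec_get_free_tag_name; infer_instance

-- ===== CLAIM (what is proved, stated in full; the proofs are below) =====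
def Claim_equal_get_free_tag_name : Prop := ∀ (original_string : String) (names_list : List String), Dom_get_free_tag_name original_string names_list → Spec_get_free_tag_name original_string names_list (get_free_tag_name original_string names_list)

-- ===== LEMMAS AND PROOFS =====

-- decimal value of a digit character / of a digit string (proof-only helpers)
def pvChVal (c : Char) : Nat := c.toNat - 48
def pvLVal (l : List Char) : Nat := l.foldl (fun a c => a * 10 + pvChVal c) 0

theorem pvLVal_append_singleton (l : List Char) (c : Char) :
    pvLVal (l ++ [c]) = pvLVal l * 10 + pvChVal c := by
  simp [pvLVal, List.foldl_append]

theorem pvChVal_digitChar (m : Nat) (hm : m < 10) : pvChVal m.digitChar = m := by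
  interval_cases m <;> decide

theorem pvLVal_toDigits (n : Nat) : pvLVal (Nat.toDigits 10 n) = n := by
  induction n using Nat.strong_induction_on with
  | _ n ih =>
    rw [Nat.toDigits_eq_if (by norm_num)]
    split
    · next h =>
      have : pvLVal [n.digitChar] = pvChVal n.digitChar := by simp [pvLVal]
      rw [this, pvChVal_digitChar n h]
    · next h =>
      rw [pvLVal_append_singleton, ih (n / 10) (by omega),
        pvChVal_digitChar (n % 10) (Nat.mod_lt _ (by norm_num))]
      omega

theorem pvToStr_inj {a b : Int} (ha : 0 ≤ a) (hb : 0 ≤ b)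
    (h : PySem.Int.toStr a = PySem.Int.toStr b) : a = b := by
  have h' : PySem.Int.toChars a = PySem.Int.toChars b := by
    have := congrArg String.toList h
    simpa [PySem.Int.toList_toStr] using this
  unfold PySem.Int.toChars at h'
  rw [if_neg (by omega), if_neg (by omega)] at h'
  have := congrArg pvLVal h'
  rw [pvLVal_toDigits, pvLVal_toDigits] at this
  omega

-- a digit char is its value's digitChar
theorem pv_char_bounds (c : Char) (h : '0' ≤ c ∧ c ≤ '9') : 48 ≤ c.toNat ∧ c.toNat ≤ 57 := by
  obtain ⟨h1, h2⟩ := h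
  rw [Char.le_def, UInt32.le_iff_toNat_le] at h1 h2
  exact ⟨h1, h2⟩

theorem pv_digitChar_chVal (c : Char) (h : '0' ≤ c ∧ c ≤ '9') :
    Nat.digitChar (pvChVal c) = c := by
  have hb := pv_char_bounds c h
  have : c = Char.ofNat c.toNat := by simp [Char.ofNat_toNat]
  rw [this]
  unfold pvChVal
  set m := c.toNat - 48 with hm
  have hcv : c.toNat = 48 + m := by omega
  have hm10 : m < 10 := by omega
  rw [hcv]
  interval_cases m <;> decide

theorem pv_chVal_lt (c : Char) (h : '0' ≤ c ∧ c ≤ '9') : pvChVal c < 10 := by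
  have := pv_char_bounds c h; unfold pvChVal; omega

theorem pv_digitChar_is_digit (m : Nat) (hm : m < 10) :
    '0' ≤ Nat.digitChar m ∧ Nat.digitChar m ≤ '9' := by
  interval_cases m <;> exact ⟨by decide, by decide⟩

-- toDigits of a positive number: nonempty, all digits, leading digit not '0'
theorem pv_toDigits_ne_nil (n : Nat) : Nat.toDigits 10 n ≠ [] := by
  rw [Nat.toDigits_eq_if (by norm_num)]
  split <;> simp

theorem pv_toDigits_digits (n : Nat) : ∀ c ∈ Nat.toDigits 10 n, '0' ≤ c ∧ c ≤ '9' := by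
  induction n using Nat.strong_induction_on with
  | _ n ih =>
    rw [Nat.toDigits_eq_if (by norm_num)]
    split
    · next h =>
      intro c hc
      simp at hc
      subst hc
      exact pv_digitChar_is_digit n h
    · next h =>
      intro c hc
      rw [List.mem_append] at hc
      rcases hc with hc | hc
      · exact ih (n / 10) (by omega) c hc
      · simp at hc
        subst hc
        exact pv_digitChar_is_digit (n % 10) (Nat.mod_lt _ (by norm_num))

theorem pv_toDigits_head (n : Nat) (hn : 1 ≤ n) :
    ∀ c, (Nat.toDigits 10 n).head? = some c → c ≠ '0' := by
  induction n using Nat.strong_induction_on with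
  | _ n ih =>
    rw [Nat.toDigits_eq_if (by norm_num)]
    split
    · next h =>
      intro c hc
      simp at hc
      subst hc
      interval_cases n <;> decide
    · next h =>
      intro c hc
      rw [List.head?_append_of_ne_nil _ (pv_toDigits_ne_nil _)] at hc
      exact ih (n / 10) (by omega) (by omega) c hc

-- the value of a nonempty digit string without leading zero is ≥ 1
theorem pv_foldl_ge_one (l : List Char) (a : Nat) (ha : 1 ≤ a) :
    1 ≤ l.foldl (fun a c => a * 10 + pvChVal c) a := by
  induction l generalizing a with
  | nil => simpa
  | cons c rest ih =>
    simp only [List.foldl_cons]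
    exact ih _ (by omega)

theorem pvLVal_ge_one (c : Char) (l : List Char) (hc : '0' ≤ c ∧ c ≤ '9') (h0 : c ≠ '0') :
    1 ≤ pvLVal (c :: l) := by
  have hb := pv_char_bounds c hc
  have hne : c.toNat ≠ 48 := by
    intro hcv
    apply h0
    have : c = Char.ofNat c.toNat := by simp [Char.ofNat_toNat]
    rw [this, hcv]
  unfold pvLVal
  simp only [List.foldl_cons]
  exact pv_foldl_ge_one l _ (by unfold pvChVal; omega)

-- canonicity: a nonempty all-digit string without leading zero IS toDigits of its value
theorem pv_canon (cs : List Char) (hd : ∀ c ∈ cs, '0' ≤ c ∧ c ≤ '9') (hne : cs ≠ [])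
    (hh : ∀ c, cs.head? = some c → c ≠ '0') : Nat.toDigits 10 (pvLVal cs) = cs := by
  induction cs using List.reverseRecOn with
  | nil => exact absurd rfl hne
  | append_singleton l c ih =>
    by_cases hl : l = []
    · subst hl
      simp only [List.nil_append] at *
      have hdc : '0' ≤ c ∧ c ≤ '9' := hd c (by simp)
      have hc0 : c ≠ '0' := hh c (by simp)
      have h1 : 1 ≤ pvLVal [c] := pvLVal_ge_one c [] hdc hc0
      have hlt : pvLVal [c] < 10 := by
        have := pv_chVal_lt c hdc
        simp [pvLVal]; omega
      rw [Nat.toDigits_eq_if (by norm_num), if_pos hlt]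
      have : pvLVal [c] = pvChVal c := by simp [pvLVal]
      rw [this, pv_digitChar_chVal c hdc]
    · have hdl : ∀ x ∈ l, '0' ≤ x ∧ x ≤ '9' := fun x hx => hd x (List.mem_append_left _ hx)
      have hhl : ∀ x, l.head? = some x → x ≠ '0' := by
        intro x hx
        exact hh x (by rw [List.head?_append_of_ne_nil _ hl]; exact hx)
      have hdc : '0' ≤ c ∧ c ≤ '9' := hd c (by simp)
      have hval : pvLVal (l ++ [c]) = pvLVal l * 10 + pvChVal c := pvLVal_append_singleton l c
      have hLge : 1 ≤ pvLVal l := by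
        cases hLc : l with
        | nil => exact absurd hLc hl
        | cons x xs =>
          exact hLc ▸ pvLVal_ge_one x xs (hdl x (by rw [hLc]; simp))
            (hhl x (by rw [hLc]; rfl))
      have hcl : pvChVal c < 10 := pv_chVal_lt c hdc
      have hge10 : ¬ pvLVal (l ++ [c]) < 10 := by omega
      rw [Nat.toDigits_eq_if (by norm_num), if_neg hge10]
      have hdiv : pvLVal (l ++ [c]) / 10 = pvLVal l := by omega
      have hmod : pvLVal (l ++ [c]) % 10 = pvChVal c := by omega
      rw [hdiv, hmod, pv_digitChar_chVal c hdc, ih hdl hl hhl]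

-- the digit loop computes the (cast) Nat value on all-digit input, none otherwise
theorem pvSufLoop_digits (cs : List Char) (v0 : Nat) (hd : ∀ c ∈ cs, '0' ≤ c ∧ c ≤ '9') :
    pvSufLoop cs (v0 : Int) = some ((cs.foldl (fun a c => a * 10 + pvChVal c) v0 : Nat) : Int) := by
  induction cs generalizing v0 with
  | nil => simp [pvSufLoop]
  | cons c rest ih =>
    have hdc := hd c (by simp)
    have hb := pv_char_bounds c hdc
    rw [pvSufLoop, if_pos hdc]
    have : (v0 : Int) * 10 + ((c.toNat : Int) - 48) = ((v0 * 10 + pvChVal c : Nat) : Int) := by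
      unfold pvChVal; push_cast [Nat.cast_sub (by omega : 48 ≤ c.toNat)]; ring
    rw [this, ih _ (fun x hx => hd x (by simp [hx]))]
    simp

theorem pvSufLoop_none (cs : List Char) (v : Int) (hd : ¬ ∀ c ∈ cs, '0' ≤ c ∧ c ≤ '9') :
    pvSufLoop cs v = none := by
  induction cs generalizing v with
  | nil => exact absurd (by simp) hd
  | cons c rest ih =>
    by_cases hdc : '0' ≤ c ∧ c ≤ '9'
    · rw [pvSufLoop, if_pos hdc]
      refine ih _ (fun hall => hd ?_)
      intro x hx
      rcases List.mem_cons.mp hx with rfl | hx'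
      · exact hdc
      · exact hall x hx'
    · rw [pvSufLoop, if_neg hdc]

-- characterization of the parser: some v exactly on the canonical decimal of a positive v
theorem pvSufVal_eq_some_iff (cs : List Char) (v : Int) :
    pvSufVal cs = some v ↔ cs = (PySem.Int.toStr v).toList ∧ 1 ≤ v := by
  constructor
  · intro h
    cases cs with
    | nil => simp [pvSufVal] at h
    | cons c rest =>
      rw [pvSufVal] at h
      by_cases hc0 : c = '0'
      · simp [hc0] at h
      rw [if_neg hc0] at h
      by_cases hall : ∀ x ∈ c :: rest, '0' ≤ x ∧ x ≤ '9'
      · rw [show (0 : Int) = ((0 : Nat) : Int) from rfl, pvSufLoop_digits _ _ hall] at h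
        have hv : v = ((pvLVal (c :: rest) : Nat) : Int) := by
          rw [← Option.some_inj, ← h]; rfl
        have hge : 1 ≤ pvLVal (c :: rest) := pvLVal_ge_one c rest (hall c (by simp)) hc0
        have hv1 : 1 ≤ v := by omega
        refine ⟨?_, hv1⟩
        rw [PySem.Int.toList_toStr]
        unfold PySem.Int.toChars
        rw [if_neg (by omega)]
        have : v.toNat = pvLVal (c :: rest) := by omega
        rw [this, pv_canon (c :: rest) hall (by simp)
          (by intro x hx; simp at hx; subst hx; exact hc0)]
      · rw [pvSufLoop_none _ _ hall] at h
        exact absurd h (by simp)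
  · rintro ⟨rfl, hv⟩
    rw [PySem.Int.toList_toStr]
    unfold PySem.Int.toChars
    rw [if_neg (by omega)]
    have hvn : 1 ≤ v.toNat := by omega
    have hdig := pv_toDigits_digits v.toNat
    cases hD : Nat.toDigits 10 v.toNat with
    | nil => exact absurd hD (pv_toDigits_ne_nil _)
    | cons c rest =>
      rw [pvSufVal]
      have hc0 : c ≠ '0' := pv_toDigits_head v.toNat hvn c (by rw [hD]; rfl)
      rw [if_neg hc0, show (0 : Int) = ((0 : Nat) : Int) from rfl,
        pvSufLoop_digits _ _ (by rw [← hD]; exact hdig)]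
      have : pvLVal (c :: rest) = v.toNat := by rw [← hD]; exact pvLVal_toDigits _
      rw [show ((c :: rest).foldl (fun a c => a * 10 + pvChVal c) 0) = pvLVal (c :: rest) from rfl, this]
      simp; omega

-- mex of a strictly increasing list whose elements are all ≥ a
theorem pvMex_spec (l : List Int) (a : Int) (hs : l.Pairwise (· < ·)) (hge : ∀ x ∈ l, a ≤ x) :
    a ≤ pvMex a l ∧ pvMex a l ∉ l ∧ ∀ c, a ≤ c → c < pvMex a l → c ∈ l := by
  induction l generalizing a with
  | nil => refine ⟨le_refl _, by simp [pvMex], ?_⟩; intro c hc hlt; simp [pvMex] at hlt; omega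
  | cons v rest ih =>
    rcases List.pairwise_cons.mp hs with ⟨hv, hrest⟩
    by_cases hva : v = a
    · subst hva
      have hge' : ∀ x ∈ rest, v + 1 ≤ x := fun x hx => by have := hv x hx; omega
      obtain ⟨h1, h2, h3⟩ := ih (v + 1) hrest hge'
      rw [pvMex, if_pos rfl]
      refine ⟨by omega, ?_, ?_⟩
      · intro hmem
        rcases List.mem_cons.mp hmem with heq | hmem'
        · omega
        · exact h2 hmem'
      · intro c hc hlt
        rcases eq_or_lt_of_le hc with rfl | hcv
        · exact List.mem_cons_self
        · exact List.mem_cons_of_mem _ (h3 c (by omega) hlt)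
    · rw [pvMex, if_neg hva]
      have hva' : a < v := lt_of_le_of_ne (hge v List.mem_cons_self) (fun h => hva h.symm)
      refine ⟨le_refl _, ?_, ?_⟩
      · intro hmem
        rcases List.mem_cons.mp hmem with heq | hmem'
        · omega
        · have := hv a hmem'  -- v < a, contradiction
          omega
      · intro c hc hlt; omega

-- membership bridge: c ≥ 1 is a parsed suffix number iff the suffixed name is in the list
theorem pv_drop_slice (pfx nm : String) :
    (PySem.Str.slice nm (some (PySem.Str.len pfx)) none).toList
      = nm.toList.drop pfx.toList.length := by
  rw [PySem.Str.toList_slice, PySem.Chars.slice_eq_listSlice]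
  rw [show PySem.Str.len pfx = (pfx.toList.length : Int) from by simp [PySem.Str.len_eq]]
  rw [PySem.List.slice_from _ (by positivity)]
  simp only [Int.toNat_natCast]

theorem pv_mem_cands_iff (orig : String) (names : List String) (c : Int) (hc : 1 ≤ c) :
    (some c) ∈ ((names.filter (fun n => PySem.Str.startswith n (orig ++ "_"))).map
        (fun n => pvSufVal (PySem.Str.slice n (some (PySem.Str.len (orig ++ "_"))) none).toList)) ↔
      (orig ++ "_" ++ PySem.Int.toStr c) ∈ names := by
  constructor
  · intro h
    rw [List.mem_map] at h
    obtain ⟨nm, hmem, hval⟩ := h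
    rw [List.mem_filter] at hmem
    obtain ⟨hnm, hsw⟩ := hmem
    rw [pvSufVal_eq_some_iff] at hval
    obtain ⟨hslice, _⟩ := hval
    have hpre : (orig ++ "_").toList <+: nm.toList := by
      rw [PySem.Str.startswith_eq] at hsw
      exact (PySem.Chars.startswith_iff _ _).mp hsw
    obtain ⟨t, ht⟩ := hpre
    have ht2 : t = (PySem.Int.toStr c).toList := by
      have h1 : nm.toList.drop (orig ++ "_").toList.length = t := by
        rw [← ht, List.drop_left]
      rw [← h1, ← pv_drop_slice, hslice]
    have htl : nm.toList = (orig ++ "_" ++ PySem.Int.toStr c).toList := by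
      rw [String.toList_append, ← ht, ht2]
    have : nm = orig ++ "_" ++ PySem.Int.toStr c := String.toList_inj.mp htl
    rwa [this] at hnm
  · intro h
    rw [List.mem_map]
    refine ⟨orig ++ "_" ++ PySem.Int.toStr c, ?_, ?_⟩
    · rw [List.mem_filter]
      refine ⟨h, ?_⟩
      rw [PySem.Str.startswith_eq]
      refine (PySem.Chars.startswith_iff _ _).mpr ?_
      exact ⟨(PySem.Int.toStr c).toList, (String.toList_append).symm⟩
    · rw [pvSufVal_eq_some_iff]
      refine ⟨?_, hc⟩
      rw [pv_drop_slice]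
      rw [show (orig ++ "_" ++ PySem.Int.toStr c).toList
          = (orig ++ "_").toList ++ (PySem.Int.toStr c).toList from String.toList_append]
      exact List.drop_left

-- A's loop returns the first free counter, provided the fuel covers it
theorem pvAgo_eq (orig : String) (names : List String) :
    ∀ (fuel : Nat) (c : Int)
      (h : ∃ j : Nat, (orig ++ "_" ++ PySem.Int.toStr (c + (j : Int))) ∉ names),
      Nat.find h < fuel →
      pvAgo orig names fuel c = orig ++ "_" ++ PySem.Int.toStr (c + (Nat.find h : Int)) := by
  intro fuel
  induction fuel with
  | zero => intro c h hlt; omega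
  | succ f ih =>
    intro c h hlt
    by_cases hm : (orig ++ "_" ++ PySem.Int.toStr c) ∈ names
    · have h0 : ¬ ((orig ++ "_" ++ PySem.Int.toStr (c + ((0 : Nat) : Int))) ∉ names) := by
        simpa using hm
      have hfind0 : Nat.find h ≠ 0 := by
        intro hz
        exact h0 (hz ▸ Nat.find_spec h)
      have h' : ∃ j : Nat, (orig ++ "_" ++ PySem.Int.toStr ((c + 1) + (j : Int))) ∉ names := by
        refine ⟨Nat.find h - 1, ?_⟩
        have hs := Nat.find_spec h
        have harith : (c + 1) + ((Nat.find h - 1 : Nat) : Int) = c + (Nat.find h : Int) := by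
          push_cast [Nat.cast_sub (by omega : 1 ≤ Nat.find h)]; ring
        rwa [harith]
      have hf' : Nat.find h' = Nat.find h - 1 := by
        apply le_antisymm
        · apply Nat.find_min' h'
          have hs := Nat.find_spec h
          have harith : (c + 1) + ((Nat.find h - 1 : Nat) : Int) = c + (Nat.find h : Int) := by
            push_cast [Nat.cast_sub (by omega : 1 ≤ Nat.find h)]; ring
          rwa [harith]
        · by_contra hcon
          push Not at hcon
          have hs' := Nat.find_spec h'
          have hmin := Nat.find_min h (m := Nat.find h' + 1) (by omega)
          apply hmin
          have harith : c + ((Nat.find h' + 1 : Nat) : Int) = (c + 1) + (Nat.find h' : Int) := by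
            push_cast; ring
          rwa [harith]
      have hres := ih (c + 1) h' (by omega)
      have harith : (c + 1) + ((Nat.find h' : Nat) : Int) = c + (Nat.find h : Int) := by
        rw [hf']
        push_cast [Nat.cast_sub (by omega : 1 ≤ Nat.find h)]; ring
      rw [pvAgo]
      simp only [hm, if_pos]
      rw [hres, harith]
    · have hfind0 : Nat.find h = 0 := by
        rw [Nat.find_eq_zero]
        simpa using hm
      rw [pvAgo]
      simp only [hm, hfind0]
      simp

-- appending the prefix and then a decimal string is injective in the counter (both ≥ 0)
theorem pv_name_inj (pfx : String) {a b : Int} (ha : 0 ≤ a) (hb : 0 ≤ b)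
    (h : pfx ++ PySem.Int.toStr a = pfx ++ PySem.Int.toStr b) : a = b := by
  apply pvToStr_inj ha hb
  apply String.toList_inj.mp
  have := congrArg String.toList h
  rw [String.toList_append, String.toList_append] at this
  exact List.append_cancel_left this

-- pigeonhole: among counters 1 .. L.length+1 some candidate name avoids any list L
theorem pv_exists_free (f : Int → String)
    (hf : ∀ a b : Int, 0 ≤ a → 0 ≤ b → f a = f b → a = b) (L : List String) :
    ∃ j : Nat, j ≤ L.length ∧ f (1 + (j : Int)) ∉ L := by
  by_contra hcon
  push Not at hcon
  have hall : ∀ j ∈ List.range (L.length + 1), f (1 + (j : Int)) ∈ L := by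
    intro j hj
    rw [List.mem_range] at hj
    exact hcon j (by omega)
  have hnodup : ((List.range (L.length + 1)).map (fun j : Nat => f (1 + (j : Int)))).Nodup := by
    refine (List.nodup_range).map_on ?_
    intro a _ b _ hab
    have := hf _ _ (by positivity) (by positivity) hab
    omega
  have hsub : ((List.range (L.length + 1)).map (fun j : Nat => f (1 + (j : Int)))) ⊆ L := by
    intro x hx
    rw [List.mem_map] at hx
    obtain ⟨j, hj, rfl⟩ := hx
    exact hall j hj
  have := (hnodup.subperm hsub).length_le
  simp at this

-- ===== VERDICT (by name: the statement is the Claim_ definition above) =====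
theorem get_free_tag_name_spec : Claim_equal_get_free_tag_name := by
  intro orig names _hdom
  unfold Spec_get_free_tag_name get_free_tag_name get_free_tag_name_alt
  by_cases hin : orig ∈ names
  · simp only [hin, if_pos, not_true_eq_false, if_neg, not_false_eq_true]
    set cands := (names.filter (fun n => PySem.Str.startswith n (orig ++ "_"))).map
      (fun n => pvSufVal (PySem.Str.slice n (some (PySem.Str.len (orig ++ "_"))) none).toList)
      with hcands
    set used := PySem.List.sorted (PySem.Set.ofList (cands.filterMap id)) (fun x => x) false
      with hused
    -- membership in the sorted used list
    have hmemU : ∀ x : Int, x ∈ used ↔ (some x) ∈ cands := by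
      intro x
      rw [hused, PySem.List.mem_sorted, PySem.Set.mem_ofList, List.mem_filterMap]
      constructor
      · rintro ⟨a, ha, rfl⟩
        exact ha
      · intro hx
        exact ⟨some x, hx, rfl⟩
    -- every used number is ≥ 1
    have hge1 : ∀ x ∈ used, (1 : Int) ≤ x := by
      intro x hx
      rw [hmemU] at hx
      rw [hcands, List.mem_map] at hx
      obtain ⟨nm, _, hval⟩ := hx
      exact ((pvSufVal_eq_some_iff _ _).mp hval).2
    have hpair : used.Pairwise (· < ·) := PySem.List.sorted_ofList_pairwise_lt (cands.filterMap id)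
    obtain ⟨hm1, hm2, hm3⟩ := pvMex_spec used 1 hpair hge1
    set M := pvMex 1 used with hM
    -- the witness existence for A's loop, within its fuel
    obtain ⟨jA, hjA, hfreeA⟩ := pv_exists_free
      (fun c => orig ++ "_" ++ PySem.Int.toStr c)
      (fun a b ha hb h => pv_name_inj (orig ++ "_") ha hb h) names
    have hA : ∃ j : Nat, (orig ++ "_" ++ PySem.Int.toStr (1 + (j : Int))) ∉ names := ⟨jA, hfreeA⟩
    have hAlt : Nat.find hA < names.length + 1 :=
      lt_of_le_of_lt (le_trans (Nat.find_min' hA hfreeA) hjA) (by omega)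
    -- the first free counter is exactly M
    have hMfree : (orig ++ "_" ++ PySem.Int.toStr (1 + (((M - 1).toNat : Nat) : Int))) ∉ names := by
      have hcast : (1 : Int) + ((M - 1).toNat : Int) = M := by omega
      rw [hcast]
      intro hmem
      exact hm2 ((hmemU M).mpr ((pv_mem_cands_iff orig names M hm1).mpr hmem))
    have hfindle : Nat.find hA ≤ (M - 1).toNat := Nat.find_min' hA hMfree
    have hfindge : ¬ Nat.find hA < (M - 1).toNat := by
      intro hlt
      apply Nat.find_spec hA
      set j := Nat.find hA
      have hc1 : (1 : Int) ≤ 1 + (j : Int) := by omega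
      have hcM : 1 + (j : Int) < M := by omega
      exact (pv_mem_cands_iff orig names _ hc1).mp
        ((hmemU _).mp (hm3 _ hc1 hcM))
    have hfind : (1 : Int) + (Nat.find hA : Int) = M := by omega
    rw [pvAgo_eq orig names _ 1 hA hAlt, hfind]
  · simp [hin]
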